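-- pv_equiv track=rewrite | github.com/saroad2/tau-discoverer | scripts/myHelpers_New.py | EM2shape
-- ===== SOURCE A (Python) =====
-- def longLineEM2(length, hotEta):
--     etaGran = [4, 5, 6, 7, 8, 9, 10, 11, 12, 13, 14, 15]
--     # etaGran = [1 ,2, 3, 4, 5, 6, 7, 8, 9, 10, 11, 12]
--     line = []
--     size = length  # how long do you want to make it?
--     for x in range(len(etaGran) - size + 1):
--         l = etaGran[x : x + size]
--         if hotEta in l:
--             line.append(l)
--     return line
--
-- def EM2shape(myTOB, etaMax, phiMax, length):
--     #    etaMax_EM2 = findMaxEM2(myTOB)[0]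
--
--     longLine = longLineEM2(length, etaMax)
--     b1b2 = []
--     if phiMax == 2:
--         b1b2.append((etaMax, phiMax + 1))
--         b1b2.append((etaMax, phiMax - 1))
--     if phiMax == 3:
--         b1b2.append((etaMax, phiMax - 1))
--     if phiMax == 1:
--         b1b2.append((etaMax, phiMax + 1))
--     final_shape = []
--     for line in longLine:
--         tempShape = [line, b1b2]
--         final_shape.append(tempShape)
--     return longLine
-- ===== SOURCE B (Python) =====
-- def EM2shape(myTOB, etaMax, phiMax, length):
--     # Return the windows of the fixed eta list directly: locate etaMax's index,
--     # compute the valid window-start range in closed form, and slice each window.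
--     etaGran = [4, 5, 6, 7, 8, 9, 10, 11, 12, 13, 14, 15]
--     if etaMax not in etaGran:
--         return []
--     if length <= 0 or length > len(etaGran):
--         return []
--     i = etaGran.index(etaMax)
--     lo = max(0, i - length + 1)
--     hi = min(i, len(etaGran) - length)
--     return [etaGran[x:x + length] for x in range(lo, hi + 1)]
-- ===== Notes on version B (the rewrite author's own statement) =====
-- stated objective: simpler
-- what changed: Instead of scanning every window of the fixed eta list and testing membership (plus building a dead b1b2/final_shape structure), B locates etaMax's index once and emits exactly the valid windows from a closed-form start range; the dead code is dropped.
-- intended difference: For -11 <= length <= -1 and 4 <= etaMax <= 14, Python's negative-stop slice wraparound makes A return nonempty truncated windows (e.g. [[6,...,14]] for length=-3, etaMax=6); B returns [] since a non-positive window size yields no windows, which is the intended behaviour for a window-size parameter. — e.g. on EM2shape([], 6, 2, -3): A returns [[4, 5, 6, 7, 8, 9, 10, 11, 12], [5, 6, 7, 8, 9, 10, 11, 12, 13], [6, 7, 8, 9, 10, 11, 12, 13, 14]], B returns []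
import Mathlib
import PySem

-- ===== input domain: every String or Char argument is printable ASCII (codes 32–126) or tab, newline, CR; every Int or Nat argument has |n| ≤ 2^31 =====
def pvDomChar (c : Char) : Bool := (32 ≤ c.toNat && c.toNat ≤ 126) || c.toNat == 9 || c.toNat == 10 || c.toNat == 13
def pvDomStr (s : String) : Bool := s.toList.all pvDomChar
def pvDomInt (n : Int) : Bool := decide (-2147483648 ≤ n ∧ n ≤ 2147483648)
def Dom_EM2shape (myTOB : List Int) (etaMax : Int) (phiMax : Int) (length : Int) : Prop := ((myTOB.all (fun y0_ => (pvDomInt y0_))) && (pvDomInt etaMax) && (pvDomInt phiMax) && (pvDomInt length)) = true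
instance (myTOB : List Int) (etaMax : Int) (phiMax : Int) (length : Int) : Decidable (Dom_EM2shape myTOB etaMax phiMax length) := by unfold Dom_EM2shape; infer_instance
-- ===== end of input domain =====

-- B drops A's dead b1b2/final_shape code and builds the valid windows directly from
-- etaMax's index via a closed-form start range, instead of scanning all windows;
-- on negative `length` A's slice wraparound yields truncated windows (see D_ below).


-- ===== PORT A =====
def longLineEM2 (length : Int) (hotEta : Int) : List (List Int) :=
  let etaGran : List Int := [4, 5, 6, 7, 8, 9, 10, 11, 12, 13, 14, 15]
  (PySem.List.pyRange 0 ((etaGran.length : Int) - length + 1) 1).foldl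
    (fun line x =>
      let l := PySem.List.slice etaGran (some x) (some (x + length))
      if hotEta ∈ l then line ++ [l] else line) []

def EM2shape (myTOB : List Int) (etaMax : Int) (phiMax : Int) (length : Int) : List (List Int) :=
  let longLine := longLineEM2 length etaMax
  let b1b2 : List (Int × Int) :=
    (if phiMax = 2 then [(etaMax, phiMax + 1), (etaMax, phiMax - 1)] else []) ++
    (if phiMax = 3 then [(etaMax, phiMax - 1)] else []) ++
    (if phiMax = 1 then [(etaMax, phiMax + 1)] else [])
  let _final_shape := longLine.foldl (fun acc line => acc ++ [(line, b1b2)]) []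
  longLine

-- ===== PORT B =====
def EM2shape_alt (myTOB : List Int) (etaMax : Int) (phiMax : Int) (length : Int) : List (List Int) :=
  let etaGran : List Int := [4, 5, 6, 7, 8, 9, 10, 11, 12, 13, 14, 15]
  match PySem.List.index? etaGran etaMax with
  | none => []
  | some i =>
    if length ≤ 0 ∨ (etaGran.length : Int) < length then []
    else
      let lo : Int := max 0 ((i : Int) - length + 1)
      let hi : Int := min (i : Int) ((etaGran.length : Int) - length)
      (PySem.List.pyRange lo (hi + 1) 1).map
        (fun x => PySem.List.slice etaGran (some x) (some (x + length)))

-- ===== PRECONDITION & SPEC =====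
-- For -11 ≤ length ≤ -1 and 4 ≤ etaMax ≤ 14, A's negative slice stop wraps around and A
-- returns nonempty truncated windows; B returns [], the intended value for a non-positive
-- window size.
def D_EM2shape (myTOB : List Int) (etaMax : Int) (phiMax : Int) (length : Int) : Prop :=
  -11 ≤ length ∧ length ≤ -1 ∧ 4 ≤ etaMax ∧ etaMax ≤ 14
instance (myTOB : List Int) (etaMax : Int) (phiMax : Int) (length : Int) : Decidable (D_EM2shape myTOB etaMax phiMax length) := by unfold D_EM2shape; infer_instance

def Spec_EM2shape (myTOB : List Int) (etaMax : Int) (phiMax : Int) (length : Int) (out : List (List Int)) : Prop := ¬ D_EM2shape myTOB etaMax phiMax length → out = EM2shape_alt myTOB etaMax phiMax length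
instance (myTOB : List Int) (etaMax : Int) (phiMax : Int) (length : Int) (out : List (List Int)) : Decidable (Spec_EM2shape myTOB etaMax phiMax length out) := by unfold Spec_EM2shape; infer_instance

def pvDiffWitness_EM2shape : List Int × Int × Int × Int := ([], 6, 2, -3)
def pvDiffWitnessOut_EM2shape : (List (List Int)) × (List (List Int)) :=
  ([[4, 5, 6, 7, 8, 9, 10, 11, 12], [5, 6, 7, 8, 9, 10, 11, 12, 13], [6, 7, 8, 9, 10, 11, 12, 13, 14]], [])

-- ===== CLAIM (what is proved, stated in full; the proofs are below) =====
def Claim_unchanged_EM2shape : Prop := ∀ (myTOB : List Int) (etaMax : Int) (phiMax : Int) (length : Int), Dom_EM2shape myTOB etaMax phiMax length → Spec_EM2shape myTOB etaMax phiMax length (EM2shape myTOB etaMax phiMax length)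
def Claim_changed_EM2shape : Prop := Dom_EM2shape (pvDiffWitness_EM2shape.1) (pvDiffWitness_EM2shape.2.1) (pvDiffWitness_EM2shape.2.2.1) (pvDiffWitness_EM2shape.2.2.2) ∧ D_EM2shape (pvDiffWitness_EM2shape.1) (pvDiffWitness_EM2shape.2.1) (pvDiffWitness_EM2shape.2.2.1) (pvDiffWitness_EM2shape.2.2.2) ∧ EM2shape (pvDiffWitness_EM2shape.1) (pvDiffWitness_EM2shape.2.1) (pvDiffWitness_EM2shape.2.2.1) (pvDiffWitness_EM2shape.2.2.2) = pvDiffWitnessOut_EM2shape.1 ∧ EM2shape_alt (pvDiffWitness_EM2shape.1) (pvDiffWitness_EM2shape.2.1) (pvDiffWitness_EM2shape.2.2.1) (pvDiffWitness_EM2shape.2.2.2) = pvDiffWitnessOut_EM2shape.2 ∧ pvDiffWitnessOut_EM2shape.1 ≠ pvDiffWitnessOut_EM2shape.2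
def Claim_exact_EM2shape : Prop := ∀ (myTOB : List Int) (etaMax : Int) (phiMax : Int) (length : Int), Dom_EM2shape myTOB etaMax phiMax length → D_EM2shape myTOB etaMax phiMax length → EM2shape myTOB etaMax phiMax length ≠ EM2shape_alt myTOB etaMax phiMax length

-- ===== LEMMAS AND PROOFS =====

-- A's loop keeps the accumulator unchanged when the hot value lies in no slice.
lemma foldl_filter_nil (f : Int → List Int) (hot : Int) (l : List Int)
    (acc : List (List Int)) (h : ∀ x ∈ l, hot ∉ f x) :
    l.foldl (fun line x => if hot ∈ f x then line ++ [f x] else line) acc = acc := by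
  induction l generalizing acc with
  | nil => rfl
  | cons y ys ih =>
    simp only [List.foldl_cons]
    rw [if_neg (h y (by simp))]
    exact ih acc (fun x hx => h x (by simp [hx]))

lemma slice_eq_nil (xs : List Int) (a b : Int)
    (h : PySem.List.clampIdx xs.length b ≤ PySem.List.clampIdx xs.length a) :
    PySem.List.slice xs (some a) (some b) = [] := by
  have := PySem.List.length_slice xs a b
  exact List.eq_nil_of_length_eq_zero (by omega)

lemma clampIdx_le_clampIdx (n : Nat) (a b : Int) (ha : 0 ≤ a) (hb : b ≤ a) (hn : b + (n : Int) ≤ a) :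
    PySem.List.clampIdx n b ≤ PySem.List.clampIdx n a := by
  unfold PySem.List.clampIdx
  split_ifs <;> omega

-- core equality of the two ports outside the change region
lemma EM2shape_eq (myTOB : List Int) (etaMax phiMax length : Int)
    (hD : ¬ D_EM2shape myTOB etaMax phiMax length) :
    EM2shape myTOB etaMax phiMax length = EM2shape_alt myTOB etaMax phiMax length := by
  show longLineEM2 length etaMax = EM2shape_alt myTOB etaMax phiMax length
  have halt : EM2shape_alt myTOB etaMax phiMax length = EM2shape_alt [] etaMax 0 length := rfl
  rw [halt]
  by_cases hmem : etaMax ∈ ([4, 5, 6, 7, 8, 9, 10, 11, 12, 13, 14, 15] : List Int)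
  · rcases (by omega : (12 : Int) < length ∨ length ≤ 12) with hlen | hlen
    · -- length ≥ 13: A's range is empty, B's guard fires
      simp only [longLineEM2, EM2shape_alt]
      rw [PySem.List.pyRange_one_eq_nil (by simp; omega)]
      rcases h : PySem.List.index? ([4, 5, 6, 7, 8, 9, 10, 11, 12, 13, 14, 15] : List Int) etaMax with _ | i
      · simp
      · simp
        intro _ h2
        exact absurd h2 (by omega)
    · rcases (by omega : (0 : Int) < length ∨ length ≤ 0) with hpos | hnp
      · -- 1 ≤ length ≤ 12, etaMax in the list: finitely many cases
        fin_cases hmem <;> interval_cases length <;> decide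
      · -- length ≤ 0, not in D_: etaMax ∈ [4,14] forces length = 0 or length ≤ -12,
        -- where every slice is empty; etaMax = 15 is in no truncated window.
        by_cases h15 : etaMax = 15
        · subst h15
          unfold D_EM2shape at hD
          rcases (by omega : length < -11 ∨ -11 ≤ length) with hsm | hlg
          · simp only [longLineEM2, EM2shape_alt]
            rw [foldl_filter_nil _ _ _ _ (fun x hx => ?_)]
            · simp [(by omega : length ≤ 0)]
              split <;> rfl
            · rw [slice_eq_nil]
              · simp
              · have hx0 : 0 ≤ x := (PySem.List.mem_pyRange_one.mp hx).1
                exact clampIdx_le_clampIdx 12 x (x + length) hx0 (by omega) (by simp; omega)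
          · interval_cases length <;> decide
        · by_cases h0 : length = 0
          · subst h0
            simp only [longLineEM2, EM2shape_alt]
            rw [foldl_filter_nil _ _ _ _ (fun x hx => ?_)]
            · simp
              split <;> rfl
            · rw [add_zero, slice_eq_nil _ _ _ le_rfl]; simp
          · -- -11 ≤ length ≤ -1 would put (etaMax, length) inside D_, so length ≤ -12
            unfold D_EM2shape at hD
            have hm' : 4 ≤ etaMax ∧ etaMax ≤ 14 := by
              fin_cases hmem <;> simp_all
            have hsm : length ≤ -12 := by omega
            simp only [longLineEM2, EM2shape_alt]
            rw [foldl_filter_nil _ _ _ _ (fun x hx => ?_)]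
            · simp [(by omega : length ≤ 0)]
              split <;> rfl
            · rw [slice_eq_nil]
              · simp
              · have hx0 : 0 ≤ x := (PySem.List.mem_pyRange_one.mp hx).1
                exact clampIdx_le_clampIdx 12 x (x + length) hx0 (by omega) (by simp; omega)
  · -- etaMax not in the eta list: A appends nothing, B's index? is none
    have h := (PySem.List.index?_eq_none_iff ([4, 5, 6, 7, 8, 9, 10, 11, 12, 13, 14, 15] : List Int) etaMax).mpr hmem
    rw [PySem.List.index?_eq_idxOf?] at h
    simp only [longLineEM2, EM2shape_alt]
    rw [foldl_filter_nil _ _ _ _ (fun x hx hin => hmem (PySem.List.mem_of_mem_slice _ _ _ hin))]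
    simp [h]

-- ===== VERDICT (by name: the statement is the Claim_ definition above) =====
theorem EM2shape_spec : Claim_unchanged_EM2shape := by
  intro myTOB etaMax phiMax length _ hD
  exact (EM2shape_eq myTOB etaMax phiMax length hD).symm ▸ rfl

theorem EM2shape_changed : Claim_changed_EM2shape := by
  unfold Claim_changed_EM2shape; decide

theorem EM2shape_tight : Claim_exact_EM2shape := by
  intro myTOB etaMax phiMax length _ hD
  unfold D_EM2shape at hD
  obtain ⟨h1, h2, h3, h4⟩ := hD
  show longLineEM2 length etaMax ≠ EM2shape_alt myTOB etaMax phiMax length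
  have halt : EM2shape_alt myTOB etaMax phiMax length = EM2shape_alt [] etaMax 0 length := rfl
  rw [halt]
  interval_cases length <;> interval_cases etaMax <;> decide
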